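-- pv_equiv track=rewrite | github.com/wesleylether/advent-of-code-python | 2025/01.py | part_one
-- ===== SOURCE A (Python) =====
-- def part_one(data):
--     start = 50
--     count = 0
--     for d in data:
--         direction, steps = d
--         match direction:
--             case "L":
--                 start -= steps
--             case "R":
--                 start += steps
--
--         start %= 100
--         if start == 0:
--             count += 1
--
--     return count
-- ===== SOURCE B (Python) =====
-- def part_one(data):
--     # Divide and conquer: each segment is summarised by (total delta, 100-bucket
--     # histogram of residues of its nonempty prefix delta-sums); position is 0
--     # exactly when the prefix delta-sum is 50 mod 100.
--     def solve(seg):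
--         if len(seg) <= 1:
--             hist = [0] * 100
--             if not seg:
--                 return 0, hist
--             d, s = seg[0]
--             total = -s if d == "L" else s if d == "R" else 0
--             hist[total % 100] = 1
--             return total, hist
--         mid = len(seg) // 2
--         tl, hl = solve(seg[:mid])
--         tr, hr = solve(seg[mid:])
--         hist = [hl[q] + hr[(q - tl) % 100] for q in range(100)]
--         return tl + tr, hist
--     return solve(data)[1][50]
-- ===== Notes on version B (the rewrite author's own statement) =====
-- stated objective: alternative
-- what changed: B replaces A's fused left-to-right loop by a divide-and-conquer: each half is summarised by (total delta, 100-bucket histogram of prefix-sum residues), histograms are merged by shifting the right one by the left total, and the answer is read from bucket 50.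
import Mathlib
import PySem

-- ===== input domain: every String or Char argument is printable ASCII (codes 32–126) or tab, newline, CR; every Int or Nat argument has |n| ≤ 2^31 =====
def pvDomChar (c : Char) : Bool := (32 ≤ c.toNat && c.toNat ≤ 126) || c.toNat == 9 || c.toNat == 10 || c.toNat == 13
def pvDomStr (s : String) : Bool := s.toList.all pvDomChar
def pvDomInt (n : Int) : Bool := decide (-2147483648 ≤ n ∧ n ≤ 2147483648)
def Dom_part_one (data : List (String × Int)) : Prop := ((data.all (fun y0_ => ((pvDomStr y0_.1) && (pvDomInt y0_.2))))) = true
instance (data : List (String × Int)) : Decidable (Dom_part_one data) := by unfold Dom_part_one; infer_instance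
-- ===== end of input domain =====

-- B replaces A's fused position/counter loop by a divide-and-conquer over segment
-- summaries (total delta, 100-bucket histogram of prefix-sum residues).

-- ===== PORT A =====
def part_one (data : List (String × Int)) : Int :=
  let st := data.foldl (fun (st : Int × Int) d =>
    let start := if d.1 == "L" then st.1 - d.2 else if d.1 == "R" then st.1 + d.2 else st.1
    let start := PySem.Int.mod start 100
    (start, if start == 0 then st.2 + 1 else st.2)) (50, 0)
  st.2

-- ===== PORT B =====
-- solve(seg) = (total delta of seg, hist) where hist has 100 buckets.
-- Index arguments to getD / set are Python mods by 100, hence in [0,100): .toNat is exact.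
def pvSolve (seg : List (String × Int)) : Int × List Int :=
  if h : seg.length ≤ 1 then
    let hist := List.replicate 100 (0 : Int)
    match seg with
    | [] => (0, hist)
    | d :: _ =>
      let total := if d.1 == "L" then -d.2 else if d.1 == "R" then d.2 else 0
      (total, hist.set (PySem.Int.mod total 100).toNat 1)
  else
    let mid := seg.length / 2
    let l := pvSolve (seg.take mid)
    let r := pvSolve (seg.drop mid)
    (l.1 + r.1,
      (List.range 100).map (fun q =>
        l.2.getD q 0 + r.2.getD (PySem.Int.mod ((q : Int) - l.1) 100).toNat 0))
termination_by seg.length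
decreasing_by
  · simp only [List.length_take]; omega
  · simp only [List.length_drop]; omega

def part_one_alt (data : List (String × Int)) : Int :=
  (pvSolve data).2.getD 50 0

-- ===== PRECONDITION & SPEC =====
def Spec_part_one (data : List (String × Int)) (out : Int) : Prop := out = part_one_alt data
instance (data : List (String × Int)) (out : Int) : Decidable (Spec_part_one data out) := by unfold Spec_part_one; infer_instance

-- ===== CLAIM (what is proved, stated in full; the proofs are below) =====
def Claim_equal_part_one : Prop := ∀ (data : List (String × Int)), Dom_part_one data → Spec_part_one data (part_one data)

-- ===== LEMMAS AND PROOFS =====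

-- the signed delta of one move
def pvDelta (d : String × Int) : Int :=
  if d.1 == "L" then -d.2 else if d.1 == "R" then d.2 else 0

-- number of nonempty prefixes of seg whose delta-sum is ≡ q (mod 100)
def pvPCount : List (String × Int) → Int → Int
  | [], _ => 0
  | d :: rest, q =>
      (if (pvDelta d - q) % 100 = 0 then 1 else 0) + pvPCount rest (q - pvDelta d)

def pvSum (seg : List (String × Int)) : Int := (seg.map pvDelta).sum

theorem pvPCount_congr (seg : List (String × Int)) (a b : Int) (h : a % 100 = b % 100) :
    pvPCount seg a = pvPCount seg b := by
  induction seg generalizing a b with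
  | nil => rfl
  | cons d rest ih =>
    simp only [pvPCount]
    rw [ih (a - pvDelta d) (b - pvDelta d) (by omega)]
    congr 1
    by_cases hc : (pvDelta d - a) % 100 = 0 <;> [skip; skip] <;>
      simp [hc, show ((pvDelta d - b) % 100 = 0) ↔ ((pvDelta d - a) % 100 = 0) by omega]

theorem pvPCount_append (l r : List (String × Int)) (q : Int) :
    pvPCount (l ++ r) q = pvPCount l q + pvPCount r (q - pvSum l) := by
  induction l generalizing q with
  | nil => simp [pvPCount, pvSum]
  | cons d rest ih =>
    simp only [List.cons_append, pvPCount, ih]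
    have hs : pvSum (d :: rest) = pvDelta d + pvSum rest := by simp [pvSum]
    rw [pvPCount_congr r (q - pvDelta d - pvSum rest) (q - pvSum (d :: rest)) (by omega)]
    ring

-- A's fold, with accumulator pulled out, counts residue-hits of prefix sums.
theorem pvA_fold (rest : List (String × Int)) (s c : Int) :
    (rest.foldl (fun (st : Int × Int) d =>
      let start := if d.1 == "L" then st.1 - d.2 else if d.1 == "R" then st.1 + d.2 else st.1
      let start := PySem.Int.mod start 100
      (start, if start == 0 then st.2 + 1 else st.2)) (s, c)).2
      = c + pvPCount rest (-s) := by
  induction rest generalizing s c with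
  | nil => simp [pvPCount]
  | cons d rest ih =>
    simp only [List.foldl_cons, ih, pvPCount]
    rw [PySem.Int.mod_eq_emod_of_pos (by norm_num)]
    have hδ : (if d.1 == "L" then s - d.2 else if d.1 == "R" then s + d.2 else s)
        = s + pvDelta d := by
      unfold pvDelta; split_ifs <;> ring
    rw [hδ]
    rw [pvPCount_congr rest (-((s + pvDelta d) % 100)) (-s - pvDelta d) (by omega)]
    by_cases hz : (s + pvDelta d) % 100 = 0
    · have hz2 : (pvDelta d - -s) % 100 = 0 := by omega
      rw [hz, if_pos hz2]
      simp
      omega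
    · have hb : (((s + pvDelta d) % 100) == 0) = false := by simpa using hz
      have hz2 : ¬ (pvDelta d - -s) % 100 = 0 := by omega
      rw [hb, if_neg hz2]
      simp

-- getD on replicate and on set-of-replicate (the 100-bucket histograms)
theorem pv_getD_replicate (j : Nat) (hj : j < 100) :
    (List.replicate 100 (0:Int)).getD j 0 = 0 := by
  rw [List.getD_eq_getElem?_getD, List.getElem?_replicate, if_pos hj]
  rfl

theorem pv_getD_set (j : Nat) (hj : j < 100) (i : Nat) :
    ((List.replicate 100 (0:Int)).set i 1).getD j 0 = if j = i then 1 else 0 := by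
  rw [List.getD_eq_getElem?_getD, List.getElem?_set]
  by_cases he : i = j
  · simp [he, hj]
  · rw [if_neg he, List.getElem?_replicate, if_pos hj]
    simp [Ne.symm he]

-- getD of the range-map merge list
theorem pv_getD_rangemap (f : Nat → Int) (q : Nat) (hq : q < 100) :
    ((List.range 100).map f).getD q 0 = f q := by
  simp [List.getD_eq_getElem?_getD, hq]

-- the invariant of pvSolve
theorem pvSolve_spec (n : Nat) : ∀ seg : List (String × Int), seg.length = n →
    (pvSolve seg).1 = pvSum seg ∧
    ∀ q : Nat, q < 100 → (pvSolve seg).2.getD q 0 = pvPCount seg (q : Int) := by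
  induction n using Nat.strong_induction_on with
  | _ n ih =>
    intro seg hlen
    rw [pvSolve]
    by_cases h1 : seg.length ≤ 1
    · simp only [h1, dif_pos]
      match seg with
      | [] =>
        exact ⟨rfl, fun q hq => by rw [pv_getD_replicate q hq]; rfl⟩
      | [d] =>
        dsimp only
        rw [PySem.Int.mod_eq_emod_of_pos (by norm_num)]
        constructor
        · show pvDelta d = pvSum [d]
          simp [pvSum]
        · intro q hq
          show ((List.replicate 100 (0:Int)).set (pvDelta d % 100).toNat 1).getD q 0
              = pvPCount [d] (q : Int)
          have hm : (0:Int) ≤ pvDelta d % 100 := Int.emod_nonneg _ (by norm_num)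
          have hmlt : pvDelta d % 100 < 100 := Int.emod_lt_of_pos _ (by norm_num)
          rw [pv_getD_set q hq _]
          simp only [pvPCount, add_zero]
          by_cases he : q = (pvDelta d % 100).toNat
          · rw [if_pos he, if_pos (by omega : (pvDelta d - (q:Int)) % 100 = 0)]
          · rw [if_neg he, if_neg (by omega : ¬ (pvDelta d - (q:Int)) % 100 = 0)]
      | d :: e :: rest => simp at h1
    · simp only [h1, dif_neg, not_false_iff]
      have hlt2 : 2 ≤ seg.length := by omega
      set mid := seg.length / 2 with hmid
      have htl : (seg.take mid).length = mid := by simp; omega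
      have hdl : (seg.drop mid).length = seg.length - mid := by simp
      obtain ⟨hL1, hL2⟩ := ih (seg.take mid).length (by omega) (seg.take mid) rfl
      obtain ⟨hR1, hR2⟩ := ih (seg.drop mid).length (by omega) (seg.drop mid) rfl
      constructor
      · show (pvSolve (seg.take mid)).1 + (pvSolve (seg.drop mid)).1 = pvSum seg
        rw [hL1, hR1]
        have := List.take_append_drop mid seg
        calc pvSum (seg.take mid) + pvSum (seg.drop mid)
            = pvSum (seg.take mid ++ seg.drop mid) := by simp [pvSum]
          _ = pvSum seg := by rw [this]
      · intro q hq
        rw [pv_getD_rangemap _ q hq]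
        rw [PySem.Int.mod_eq_emod_of_pos (by norm_num)]
        set tl := (pvSolve (seg.take mid)).1 with htl'
        have hm : (0:Int) ≤ ((q:Int) - tl) % 100 := Int.emod_nonneg _ (by norm_num)
        have hmlt : ((q:Int) - tl) % 100 < 100 := Int.emod_lt_of_pos _ (by norm_num)
        have hjlt : (((q:Int) - tl) % 100).toNat < 100 := by omega
        rw [hL2 q hq, hR2 _ hjlt]
        have hcast : (((((q:Int) - tl) % 100).toNat : Int)) = ((q:Int) - tl) % 100 :=
          Int.toNat_of_nonneg hm
        rw [hcast]
        rw [pvPCount_congr (seg.drop mid) (((q:Int) - tl) % 100) ((q:Int) - tl)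
          (by omega)]
        rw [hL1]
        conv_rhs => rw [← List.take_append_drop mid seg]
        rw [pvPCount_append]

-- ===== VERDICT (by name: the statement is the Claim_ definition above) =====
theorem part_one_spec : Claim_equal_part_one := by
  intro data _
  unfold Spec_part_one part_one part_one_alt
  rw [pvA_fold data 50 0]
  obtain ⟨_, h2⟩ := pvSolve_spec data.length data rfl
  rw [h2 50 (by norm_num)]
  rw [pvPCount_congr data (-50) 50 (by norm_num)]
  simp
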